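-- pv_equiv track=rewrite | github.com/Runarok/GeeksForGeeks-solutions | Difficulty: Basic/Thief trying to escape/thief-trying-to-escape.py | totalJumps
-- ===== SOURCE A (Python) =====
-- def totalJumps(X, Y, N, arr):
--     """
--     Calculates the total number of jumps required to clear all obstacles.
--
--     :param X: Maximum height that can be cleared in one jump.
--     :param Y: Height the character slides down after each jump.
--     :param N: Number of obstacles.
--     :param arr: List of obstacle heights.
--     :return: Total number of jumps needed.
--     """
--     total_jumps = 0
--
--     for height in arr:
--         if height <= X:
--             # If the obstacle can be cleared in one jump
--             total_jumps += 1
--         else: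
--             # Remaining height to be cleared after the first jump
--             remaining_height = height - X
--             # Effective height cleared in each subsequent jump
--             effective_climb = X - Y
--
--             if effective_climb > 0:
--                 # Number of additional jumps required
--                 additional_jumps = (remaining_height + effective_climb - 1) // effective_climb
--                 total_jumps += 1 + additional_jumps  # Include the first jump
--             else:
--                 # If effective climb is zero or negative, the obstacle cannot be cleared
--                 return -1
--
--     return total_jumps
-- ===== SOURCE B (Python) =====
-- def totalJumps(X, Y, N, arr):
--     total = 0
--     climb = X - Y
--     for h in arr:
--         if h <= X:
--             total += 1
--         else:
--             if climb <= 0: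
--                 return -1
--             # smallest k >= 0 with X + k*climb >= h, found by
--             # exponential growth of an upper bound then binary search
--             hi = 1
--             while X + hi * climb < h:
--                 hi *= 2
--             lo = 0
--             while lo < hi:
--                 mid = (lo + hi) // 2
--                 if X + mid * climb >= h:
--                     hi = mid
--                 else:
--                     lo = mid + 1
--             total += 1 + lo
--     return total
-- ===== Notes on version B (the rewrite author's own statement) =====
-- stated objective: alternative
-- what changed: Replaces A's per-obstacle closed-form ceiling division by a division-free search: exponential doubling to bracket, then binary search for the minimal extra-jump count k with X + k*(X-Y) >= h.
import Mathlib
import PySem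

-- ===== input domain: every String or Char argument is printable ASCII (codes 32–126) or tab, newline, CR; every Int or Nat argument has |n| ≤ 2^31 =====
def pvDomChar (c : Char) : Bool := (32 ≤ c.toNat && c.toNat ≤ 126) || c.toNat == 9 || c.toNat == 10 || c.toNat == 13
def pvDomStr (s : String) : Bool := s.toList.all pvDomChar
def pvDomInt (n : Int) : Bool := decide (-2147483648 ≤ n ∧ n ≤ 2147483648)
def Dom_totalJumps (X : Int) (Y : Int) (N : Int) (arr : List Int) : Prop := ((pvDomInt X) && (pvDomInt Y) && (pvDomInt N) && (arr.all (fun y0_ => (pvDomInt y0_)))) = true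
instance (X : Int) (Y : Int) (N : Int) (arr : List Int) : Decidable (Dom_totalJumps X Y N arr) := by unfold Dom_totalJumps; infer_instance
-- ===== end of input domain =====

-- B replaces A's per-obstacle closed-form ceiling division by a division-free
-- exponential-doubling plus binary search for the minimal extra-jump count
-- (objective: alternative; same per-element -1 rule and outputs).

-- ===== PORT A =====
-- A's for-loop with accumulator and early return -1, as structural recursion.
def totalJumpsAux (X : Int) (Y : Int) : List Int → Int → Int
  | [], acc => acc
  | h :: t, acc =>
    if h ≤ X then totalJumpsAux X Y t (acc + 1)
    else
      if X - Y > 0 then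
        totalJumpsAux X Y t (acc + 1 + PySem.Int.floordiv ((h - X) + (X - Y) - 1) (X - Y))
      else -1

def totalJumps (X : Int) (Y : Int) (N : Int) (arr : List Int) : Int :=
  totalJumpsAux X Y arr 0

-- ===== PORT B =====
-- doubling loop `while X + hi*climb < h: hi *= 2`; the Nat fuel only makes the
-- recursion structurally total, the caller always passes enough of it
def altFindHi (X climb h : Int) : Nat → Int → Int
  | 0, hi => hi
  | fuel + 1, hi => if X + hi * climb < h then altFindHi X climb h fuel (2 * hi) else hi

-- binary search `while lo < hi: …` for the smallest k with X + k*climb >= h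
def altBsearch (X climb h : Int) : Nat → Int → Int → Int
  | 0, lo, _ => lo
  | fuel + 1, lo, hi =>
    if lo < hi then
      let mid := PySem.Int.floordiv (lo + hi) 2
      if h ≤ X + mid * climb then altBsearch X climb h fuel lo mid
      else altBsearch X climb h fuel (mid + 1) hi
    else lo

def totalJumpsAltAux (X : Int) (Y : Int) : List Int → Int → Int
  | [], acc => acc
  | h :: t, acc =>
    if h ≤ X then totalJumpsAltAux X Y t (acc + 1)
    else
      if X - Y ≤ 0 then -1
      else
        let hi := altFindHi X (X - Y) h ((h - X).toNat + 1) 1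
        totalJumpsAltAux X Y t
          (acc + 1 + altBsearch X (X - Y) h (hi.toNat + 1) 0 hi)

def totalJumps_alt (X : Int) (Y : Int) (N : Int) (arr : List Int) : Int :=
  totalJumpsAltAux X Y arr 0

-- ===== PRECONDITION & SPEC =====
def Spec_totalJumps (X : Int) (Y : Int) (N : Int) (arr : List Int) (out : Int) : Prop := out = totalJumps_alt X Y N arr
instance (X : Int) (Y : Int) (N : Int) (arr : List Int) (out : Int) : Decidable (Spec_totalJumps X Y N arr out) := by unfold Spec_totalJumps; infer_instance

-- ===== CLAIM (what is proved, stated in full; the proofs are below) =====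
def Claim_equal_totalJumps : Prop := ∀ (X : Int) (Y : Int) (N : Int) (arr : List Int), Dom_totalJumps X Y N arr → Spec_totalJumps X Y N arr (totalJumps X Y N arr)

-- ===== LEMMAS AND PROOFS =====

-- the doubling loop keeps hi positive
theorem altFindHi_pos (X climb h : Int) : ∀ (fuel : Nat) (hi : Int), 0 < hi →
    0 < altFindHi X climb h fuel hi := by
  intro fuel
  induction fuel with
  | zero => intro hi hpos; exact hpos
  | succ f ih =>
    intro hi hpos
    simp only [altFindHi]
    split_ifs with hc
    · exact ih (2 * hi) (by omega)
    · exact hpos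

-- given enough fuel, the doubling loop's result satisfies the predicate
theorem altFindHi_sat (X climb h : Int) (hc : 0 < climb) : ∀ (fuel : Nat) (hi : Int), 0 < hi →
    h - X - hi * climb ≤ (fuel : Int) →
    h ≤ X + (altFindHi X climb h fuel hi) * climb := by
  intro fuel
  induction fuel with
  | zero => intro hi _ hle; simp only [altFindHi]; omega
  | succ f ih =>
    intro hi hpos hle
    simp only [altFindHi]
    split_ifs with hcond
    · refine ih (2 * hi) (by omega) ?_
      have ht : 0 < hi * climb := mul_pos hpos hc
      have h2 : 2 * hi * climb = hi * climb + hi * climb := by ring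
      push_cast at hle ⊢
      omega
    · omega

-- given enough fuel and a bracketing interval, binary search finds the minimal k
theorem altBsearch_eq (X climb h k : Int)
    (hk : ∀ j : Int, h ≤ X + j * climb ↔ k ≤ j) :
    ∀ (fuel : Nat) (lo hi : Int), hi - lo ≤ (fuel : Int) → lo ≤ k → k ≤ hi →
    altBsearch X climb h fuel lo hi = k := by
  intro fuel
  induction fuel with
  | zero => intro lo hi hle hlo hhi; simp only [altBsearch]; omega
  | succ f ih =>
    intro lo hi hle hlo hhi
    by_cases hc : lo < hi
    · have hb := PySem.Int.floordiv_two_mid_bounds (le_of_lt hc)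
      have hlt : PySem.Int.floordiv (lo + hi) 2 < hi :=
        (PySem.Int.floordiv_lt_iff_lt_mul (by omega : (0:Int) < 2)).mpr (by omega)
      simp only [altBsearch, if_pos hc]
      by_cases hmid : h ≤ X + (PySem.Int.floordiv (lo + hi) 2) * climb
      · rw [if_pos hmid]
        have hkm := (hk _).mp hmid
        refine ih lo _ ?_ hlo hkm
        push_cast at hle ⊢; omega
      · rw [if_neg hmid]
        have hmk : ¬ k ≤ PySem.Int.floordiv (lo + hi) 2 := fun hh => hmid ((hk _).mpr hh)
        refine ih _ hi ?_ (by omega) hhi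
        push_cast at hle ⊢; omega
    · simp only [altBsearch, if_neg hc]
      omega

-- the ceiling (h - X + climb - 1) // climb is exactly the minimal k
theorem ceil_char (X climb h : Int) (hc : 0 < climb) (j : Int) :
    h ≤ X + j * climb ↔ PySem.Int.floordiv (h - X + climb - 1) climb ≤ j := by
  have hb : PySem.Int.floordiv (h - X + climb - 1) climb < j + 1 ↔
      h - X + climb - 1 < (j + 1) * climb := PySem.Int.floordiv_lt_iff_lt_mul hc
  have h2 : (j + 1) * climb = j * climb + climb := by ring
  rw [h2] at hb
  omega

-- per-obstacle: the searched minimal extra-jump count equals A's ceiling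
theorem inner_eq (X Y h : Int) (hx : ¬ h ≤ X) (hc : 0 < X - Y) :
    (let hi := altFindHi X (X - Y) h ((h - X).toNat + 1) 1
     altBsearch X (X - Y) h (hi.toNat + 1) 0 hi) =
      PySem.Int.floordiv ((h - X) + (X - Y) - 1) (X - Y) := by
  have hch := ceil_char X (X - Y) h hc
  have hpos := altFindHi_pos X (X - Y) h ((h - X).toNat + 1) 1 one_pos
  have hsat := altFindHi_sat X (X - Y) h hc ((h - X).toNat + 1) 1 one_pos
    (by push_cast; omega)
  have hk0 : ¬ PySem.Int.floordiv (h - X + (X - Y) - 1) (X - Y) ≤ 0 := by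
    intro h0
    have := (hch 0).mpr h0
    omega
  exact altBsearch_eq X (X - Y) h _ hch _ 0 _ (by push_cast; omega) (by omega)
    ((hch _).mp hsat)

theorem aux_eq (X Y : Int) (l : List Int) : ∀ acc : Int,
    totalJumpsAux X Y l acc = totalJumpsAltAux X Y l acc := by
  induction l with
  | nil => intro acc; rfl
  | cons h t ih =>
    intro acc
    simp only [totalJumpsAux, totalJumpsAltAux]
    by_cases hx : h ≤ X
    · simp [hx, ih]
    · by_cases hc : X - Y > 0
      · simp only [if_neg hx, if_pos hc, if_neg (by omega : ¬ X - Y ≤ 0)]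
        rw [ih]
        congr 1
        have := inner_eq X Y h hx hc
        simp only [] at this ⊢
        omega
      · simp only [if_neg hx, if_neg hc, if_pos (show X - Y ≤ 0 by omega)]

-- ===== VERDICT (by name: the statement is the Claim_ definition above) =====
theorem totalJumps_spec : Claim_equal_totalJumps := by
  intro X Y N arr _
  unfold Spec_totalJumps totalJumps totalJumps_alt
  exact aux_eq X Y arr 0
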